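-- pv_equiv track=rewrite | github.com/lala7573/algorithm | python/codejam2017/qualification_round/problemC_bathroom_stalls/bathroom_stalls.py | get_next_stall
-- ===== SOURCE A (Python) =====
-- def get_next_stall(occupied):
--     len_occupied = len(occupied)
--
--     maximize_min = 0
--     maximize_max = 0
--     stall_min_max = []
--     for i in range(0, len_occupied - 1):
--         for j in range(occupied[i]+1, occupied[i + 1]):
--             Rs = occupied[i + 1] - j - 1
--             Ls = j - occupied[i] - 1
--             min_of_Ls_Rs = min(Ls, Rs)
--             max_of_Ls_Rs = max(Ls, Rs)
--             if maximize_min < min_of_Ls_Rs: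
--                 maximize_min = min_of_Ls_Rs
--             stall_min_max.append((j, min_of_Ls_Rs, max_of_Ls_Rs))
--
--     # choose
--     maximized_min_list = []
--     for min_max in stall_min_max:
--         if min_max[1] == maximize_min:
--             if maximize_max < min_max[2]:
--                 maximize_max = min_max[2]
--             maximized_min_list.append(min_max)
--
--     for min_max in maximized_min_list:
--         if min_max[2] == maximize_max:
--             return min_max
-- ===== SOURCE B (Python) =====
-- def get_next_stall(occupied):
--     # one pass over adjacent pairs: keep the first gap of maximal size, then place the stall by closed form
--     best = None  # (gap_size, left_end) of the first largest gap
--     for l, r in zip(occupied, occupied[1:]):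
--         g = r - l - 1
--         if g >= 1 and (best is None or g > best[0]):
--             best = (g, l)
--     if best is None:
--         return None
--     g, l = best
--     m = (g - 1) // 2
--     return (l + 1 + m, m, g - 1 - m)
-- ===== Notes on version B (the rewrite author's own statement) =====
-- stated objective: faster
-- what changed: B replaces A's enumeration of every empty stall in every gap (building and re-scanning the full candidate list) by a single pass over adjacent occupied pairs that keeps the first largest gap and places the stall with the closed form m=(g-1)//2, returning (left+1+m, m, g-1-m).
import Mathlib
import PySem

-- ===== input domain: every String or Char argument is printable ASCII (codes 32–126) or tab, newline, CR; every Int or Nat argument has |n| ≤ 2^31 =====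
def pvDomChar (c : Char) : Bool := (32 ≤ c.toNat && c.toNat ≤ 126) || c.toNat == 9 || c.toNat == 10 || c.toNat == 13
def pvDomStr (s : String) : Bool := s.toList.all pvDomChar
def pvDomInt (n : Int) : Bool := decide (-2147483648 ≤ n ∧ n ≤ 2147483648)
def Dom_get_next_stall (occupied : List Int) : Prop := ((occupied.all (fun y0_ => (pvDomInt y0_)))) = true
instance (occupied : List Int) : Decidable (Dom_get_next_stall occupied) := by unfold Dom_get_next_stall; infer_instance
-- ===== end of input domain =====

-- B replaces A's scan of every empty stall in every gap by one pass over adjacent pairs keeping the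
-- first largest gap, placing the stall by closed form (objective: faster, O(#occupied) vs O(total stalls)).

-- ===== PORT A =====
def get_next_stall (occupied : List Int) : Option (Int × Int × Int) :=
  let len_occupied : Int := PySem.List.len occupied
  -- first loop: running maximize_min and the accumulated stall_min_max list
  let st := (PySem.List.pyRange 0 (len_occupied - 1) 1).foldl
    (fun (s : Int × List (Int × Int × Int)) i =>
      (PySem.List.pyRange (PySem.List.pyGetD occupied i 0 + 1) (PySem.List.pyGetD occupied (i + 1) 0) 1).foldl
        (fun (s : Int × List (Int × Int × Int)) j =>
          ((if s.1 < min (j - PySem.List.pyGetD occupied i 0 - 1) (PySem.List.pyGetD occupied (i + 1) 0 - j - 1)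
            then min (j - PySem.List.pyGetD occupied i 0 - 1) (PySem.List.pyGetD occupied (i + 1) 0 - j - 1)
            else s.1),
           s.2 ++ [(j, min (j - PySem.List.pyGetD occupied i 0 - 1) (PySem.List.pyGetD occupied (i + 1) 0 - j - 1),
                       max (j - PySem.List.pyGetD occupied i 0 - 1) (PySem.List.pyGetD occupied (i + 1) 0 - j - 1))]))
        s)
    (0, [])
  -- second loop: maximize_max and maximized_min_list
  let st2 := st.2.foldl
    (fun (s : Int × List (Int × Int × Int)) e =>
      if e.2.1 == st.1 then ((if s.1 < e.2.2 then e.2.2 else s.1), s.2 ++ [e]) else s)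
    (0, [])
  -- third loop: return the first entry with max == maximize_max
  st2.2.find? (fun e => e.2.2 == st2.1)

-- ===== PORT B =====
def get_next_stall_alt (occupied : List Int) : Option (Int × Int × Int) :=
  let best := (occupied.zip (PySem.List.slice occupied (some 1) none)).foldl
    (fun (b : Option (Int × Int)) (p : Int × Int) =>
      if decide (1 ≤ p.2 - p.1 - 1) && (match b with | none => true | some q => decide (q.1 < p.2 - p.1 - 1))
      then some (p.2 - p.1 - 1, p.1) else b)
    none
  match best with
  | none => none
  | some (g, l) =>
    let m := PySem.Int.floordiv (g - 1) 2
    some (l + 1 + m, m, g - 1 - m)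

-- ===== PRECONDITION & SPEC =====
def Spec_get_next_stall (occupied : List Int) (out : Option (Int × Int × Int)) : Prop := out = get_next_stall_alt occupied
instance (occupied : List Int) (out : Option (Int × Int × Int)) : Decidable (Spec_get_next_stall occupied out) := by unfold Spec_get_next_stall; infer_instance

-- ===== CLAIM (what is proved, stated in full; the proofs are below) =====
def Claim_equal_get_next_stall : Prop := ∀ (occupied : List Int), Dom_get_next_stall occupied → Spec_get_next_stall occupied (get_next_stall occupied)

-- ===== LEMMAS AND PROOFS =====

/-- the empty stretch between a pair of occupied stalls -/
def pvGap (p : Int × Int) : Int := p.2 - p.1 - 1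

/-- the (stall, min, max) entries A generates inside one gap -/
def pvEnt (p : Int × Int) : List (Int × Int × Int) :=
  (PySem.List.pyRange (p.1 + 1) p.2 1).map
    (fun j => (j, min (j - p.1 - 1) (p.2 - j - 1), max (j - p.1 - 1) (p.2 - j - 1)))

/-- B's accumulator step -/
def pvBestF (b : Option (Int × Int)) (p : Int × Int) : Option (Int × Int) :=
  if decide (1 ≤ p.2 - p.1 - 1) && (match b with | none => true | some q => decide (q.1 < p.2 - p.1 - 1))
  then some (p.2 - p.1 - 1, p.1) else b

lemma pvBestF_none (p : Int × Int) :
    pvBestF none p = if 1 ≤ p.2 - p.1 - 1 then some (p.2 - p.1 - 1, p.1) else none := by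
  unfold pvBestF
  by_cases h : (1:Int) ≤ p.2 - p.1 - 1 <;> simp [h]

lemma pvBestF_some (q p : Int × Int) :
    pvBestF (some q) p
      = if 1 ≤ p.2 - p.1 - 1 ∧ q.1 < p.2 - p.1 - 1 then some (p.2 - p.1 - 1, p.1) else some q := by
  unfold pvBestF
  by_cases h : (1:Int) ≤ p.2 - p.1 - 1 <;> by_cases h2 : q.1 < p.2 - p.1 - 1 <;> simp [h, h2]

lemma pv_fold_idx_zip {σ : Type} (f : σ → Int → Int → σ) :
    ∀ (occ : List Int) (s : σ),
      (List.range (occ.length - 1)).foldl (fun s k => f s (occ.getD k 0) (occ.getD (k + 1) 0)) s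
        = (occ.zip occ.tail).foldl (fun s p => f s p.1 p.2) s := by
  intro occ
  induction occ with
  | nil => intro s; simp
  | cons a t ih =>
    intro s
    cases t with
    | nil => simp
    | cons b u =>
      have hlen : (a :: b :: u : List Int).length - 1 = ((b :: u : List Int).length - 1) + 1 := by
        simp
      rw [hlen, List.range_succ_eq_map, List.foldl_cons, List.foldl_map]
      simp only [List.getD_cons_zero, List.getD_cons_succ, Nat.succ_eq_add_one]
      have := ih (f s a b)
      simpa using this

/-- fold of a running max equals the greatest value when it is attained -/
lemma pv_foldl_max_eq {α : Type} (f : α → Int) :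
    ∀ (l : List α) (a m : Int), a ≤ m → (∀ x ∈ l, f x ≤ m) →
      ((∃ x ∈ l, f x = m) ∨ a = m) →
      l.foldl (fun acc x => max acc (f x)) a = m := by
  intro l
  induction l with
  | nil =>
    intro a m _ _ hd
    rcases hd with h | h
    · rcases h with ⟨x, hx, _⟩; simp at hx
    · simpa using h
  | cons x t ih =>
    intro a m ha hb hd
    rw [List.foldl_cons]
    apply ih
    · exact max_le ha (hb x (by simp))
    · intro y hy; exact hb y (by simp [hy])
    · rcases hd with ⟨y, hy, hmy⟩ | h
      · rcases List.mem_cons.mp hy with rfl | hyt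
        · right; omega
        · left; exact ⟨y, hyt, hmy⟩
      · right; have := hb x (by simp); omega

lemma pv_mem_ent {e : Int × Int × Int} {p : Int × Int} :
    e ∈ pvEnt p ↔ ∃ j, p.1 + 1 ≤ j ∧ j < p.2 ∧
      e = (j, min (j - p.1 - 1) (p.2 - j - 1), max (j - p.1 - 1) (p.2 - j - 1)) := by
  simp only [pvEnt, List.mem_map, PySem.List.mem_pyRange_one]
  constructor
  · rintro ⟨j, ⟨h1, h2⟩, rfl⟩; exact ⟨j, h1, h2, rfl⟩
  · rintro ⟨j, h1, h2, rfl⟩; exact ⟨j, ⟨h1, h2⟩, rfl⟩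

lemma pv_best_none : ∀ (l : List (Int × Int)) (b : Option (Int × Int)),
    l.foldl pvBestF b = none → b = none ∧ ∀ p ∈ l, pvGap p ≤ 0 := by
  intro l
  induction l with
  | nil => intro b h; simpa using h
  | cons p t ih =>
    intro b h
    rw [List.foldl_cons] at h
    obtain ⟨hb, ht⟩ := ih (pvBestF b p) h
    cases b with
    | some q => rw [pvBestF_some] at hb; split_ifs at hb
    | none =>
      rw [pvBestF_none] at hb
      split_ifs at hb with hc
      refine ⟨rfl, ?_⟩
      intro x hx
      rcases List.mem_cons.mp hx with rfl | hxt
      · unfold pvGap; omega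
      · exact ht x hxt

lemma pv_best_some : ∀ (l : List (Int × Int)) (b : Option (Int × Int)) (G l0 : Int),
    (∀ q, b = some q → 1 ≤ q.1) → l.foldl pvBestF b = some (G, l0) →
    (b = some (G, l0) ∧ 1 ≤ G ∧ ∀ p ∈ l, pvGap p ≤ G) ∨
    (1 ≤ G ∧ (∀ p ∈ l, pvGap p ≤ G) ∧ (∀ q, b = some q → q.1 < G) ∧
      ∃ gs1 r0 gs2, l = gs1 ++ (l0, r0) :: gs2 ∧ r0 - l0 - 1 = G ∧ ∀ p ∈ gs1, pvGap p < G) := by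
  intro l
  induction l with
  | nil =>
    intro b G l0 hv h
    left
    simp only [List.foldl_nil] at h
    exact ⟨h, hv _ h, by simp⟩
  | cons p t ih =>
    obtain ⟨pl, pr⟩ := p
    intro b G l0 hv h
    rw [List.foldl_cons] at h
    cases b with
    | none =>
      rw [pvBestF_none] at h
      split_ifs at h with hg
      · simp only at hg
        rcases ih _ G l0 (by rintro q hq; injection hq with hq'; rw [← hq']; exact hg) h with h1 | h2
        · obtain ⟨hbe, hG1, hall⟩ := h1
          injection hbe with hbe'
          have hGe : pr - pl - 1 = G := congrArg Prod.fst hbe'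
          have hle : pl = l0 := congrArg Prod.snd hbe'
          right
          refine ⟨hG1, ?_, by simp, [], pr, t, ?_, by rw [← hle]; exact hGe, by simp⟩
          · intro x hx
            rcases List.mem_cons.mp hx with rfl | hxt
            · unfold pvGap; omega
            · exact hall x hxt
          · simp [← hle]
        · obtain ⟨hG1, hall, hlt, gs1, r0, gs2, hdec, hGr, hgs1⟩ := h2
          have hpG : pr - pl - 1 < G := hlt (pr - pl - 1, pl) rfl
          right
          refine ⟨hG1, ?_, by simp, (pl, pr) :: gs1, r0, gs2, by rw [hdec]; rfl, hGr, ?_⟩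
          · intro x hx
            rcases List.mem_cons.mp hx with rfl | hxt
            · unfold pvGap; omega
            · exact hall x hxt
          · intro x hx
            rcases List.mem_cons.mp hx with rfl | hxt
            · unfold pvGap; omega
            · exact hgs1 x hxt
      · simp only at hg
        rcases ih none G l0 (by simp) h with h1 | h2
        · exact absurd h1.1 (by simp)
        · obtain ⟨hG1, hall, hlt, gs1, r0, gs2, hdec, hGr, hgs1⟩ := h2
          right
          refine ⟨hG1, ?_, by simp, (pl, pr) :: gs1, r0, gs2, by rw [hdec]; rfl, hGr, ?_⟩
          · intro x hx
            rcases List.mem_cons.mp hx with rfl | hxt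
            · unfold pvGap; omega
            · exact hall x hxt
          · intro x hx
            rcases List.mem_cons.mp hx with rfl | hxt
            · unfold pvGap; omega
            · exact hgs1 x hxt
    | some q =>
      rw [pvBestF_some] at h
      split_ifs at h with hc
      · obtain ⟨hg, hq⟩ := hc
        rcases ih _ G l0 (by rintro q' hq'; injection hq' with hq''; rw [← hq'']; exact hg) h with h1 | h2
        · obtain ⟨hbe, hG1, hall⟩ := h1
          injection hbe with hbe'
          have hGe : pr - pl - 1 = G := congrArg Prod.fst hbe'
          have hle : pl = l0 := congrArg Prod.snd hbe'
          right
          refine ⟨hG1, ?_, ?_, [], pr, t, ?_, by rw [← hle]; exact hGe, by simp⟩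
          · intro x hx
            rcases List.mem_cons.mp hx with rfl | hxt
            · unfold pvGap; omega
            · exact hall x hxt
          · rintro q' hq'; injection hq' with hq''; rw [← hq'']; omega
          · simp [← hle]
        · obtain ⟨hG1, hall, hlt, gs1, r0, gs2, hdec, hGr, hgs1⟩ := h2
          have hpG : pr - pl - 1 < G := hlt (pr - pl - 1, pl) rfl
          right
          refine ⟨hG1, ?_, ?_, (pl, pr) :: gs1, r0, gs2, by rw [hdec]; rfl, hGr, ?_⟩
          · intro x hx
            rcases List.mem_cons.mp hx with rfl | hxt
            · unfold pvGap; omega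
            · exact hall x hxt
          · rintro q' hq'; injection hq' with hq''; rw [← hq'']; omega
          · intro x hx
            rcases List.mem_cons.mp hx with rfl | hxt
            · unfold pvGap; omega
            · exact hgs1 x hxt
      · rcases ih (some q) G l0 hv h with h1 | h2
        · obtain ⟨hbe, hG1, hall⟩ := h1
          injection hbe with hbe'
          left
          refine ⟨by rw [hbe'], hG1, ?_⟩
          intro x hx
          rcases List.mem_cons.mp hx with rfl | hxt
          · have : q.1 = G := by rw [hbe']
            unfold pvGap
            omega
          · exact hall x hxt
        · obtain ⟨hG1, hall, hlt, gs1, r0, gs2, hdec, hGr, hgs1⟩ := h2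
          have hqG : q.1 < G := hlt q rfl
          right
          refine ⟨hG1, ?_, hlt, (pl, pr) :: gs1, r0, gs2, by rw [hdec]; rfl, hGr, ?_⟩
          · intro x hx
            rcases List.mem_cons.mp hx with rfl | hxt
            · unfold pvGap; omega
            · exact hall x hxt
          · intro x hx
            rcases List.mem_cons.mp hx with rfl | hxt
            · unfold pvGap; omega
            · exact hgs1 x hxt

/-- A's inner running-min update is a running max of the entry mins -/
lemma pv_inner_max (p : Int × Int) (a : Int) :
    (PySem.List.pyRange (p.1 + 1) p.2 1).foldl
      (fun a j => if a < min (j - p.1 - 1) (p.2 - j - 1) then min (j - p.1 - 1) (p.2 - j - 1) else a) a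
    = (pvEnt p).foldl (fun a e => max a e.2.1) a := by
  unfold pvEnt
  rw [List.foldl_map]
  apply PySem.List.foldl_congr_mem
  intro acc x _
  dsimp only
  split <;> omega

/-- A's first loop: the running maximize_min and the flat entry list -/
lemma pv_A_loop1 (occ : List Int) :
    (PySem.List.pyRange 0 (PySem.List.len occ - 1) 1).foldl
      (fun (s : Int × List (Int × Int × Int)) i =>
        (PySem.List.pyRange (PySem.List.pyGetD occ i 0 + 1) (PySem.List.pyGetD occ (i + 1) 0) 1).foldl
          (fun (s : Int × List (Int × Int × Int)) j =>
            ((if s.1 < min (j - PySem.List.pyGetD occ i 0 - 1) (PySem.List.pyGetD occ (i + 1) 0 - j - 1)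
              then min (j - PySem.List.pyGetD occ i 0 - 1) (PySem.List.pyGetD occ (i + 1) 0 - j - 1)
              else s.1),
             s.2 ++ [(j, min (j - PySem.List.pyGetD occ i 0 - 1) (PySem.List.pyGetD occ (i + 1) 0 - j - 1),
                         max (j - PySem.List.pyGetD occ i 0 - 1) (PySem.List.pyGetD occ (i + 1) 0 - j - 1))]))
          s)
      (0, [])
    = (((occ.zip occ.tail).flatMap pvEnt).foldl (fun a e => max a e.2.1) 0,
       (occ.zip occ.tail).flatMap pvEnt) := by
  rw [PySem.List.len_eq, PySem.List.pyRange_one]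
  have h2 : ((occ.length : Int) - 1 - 0).toNat = occ.length - 1 := by omega
  rw [h2, List.foldl_map]
  have hcast : ∀ (k : Nat), ((k : Int) + 1) = ((k + 1 : Nat) : Int) := by simp
  simp only [zero_add, hcast, PySem.List.pyGetD_natCast]
  rw [pv_fold_idx_zip (f := fun (s : Int × List (Int × Int × Int)) l r =>
        (PySem.List.pyRange (l + 1) r 1).foldl
          (fun (s : Int × List (Int × Int × Int)) j =>
            ((if s.1 < min (j - l - 1) (r - j - 1) then min (j - l - 1) (r - j - 1) else s.1),
             s.2 ++ [(j, min (j - l - 1) (r - j - 1), max (j - l - 1) (r - j - 1))])) s)]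
  have hbody : (fun (s : Int × List (Int × Int × Int)) (p : Int × Int) =>
        (PySem.List.pyRange (p.1 + 1) p.2 1).foldl
          (fun (s : Int × List (Int × Int × Int)) j =>
            ((if s.1 < min (j - p.1 - 1) (p.2 - j - 1) then min (j - p.1 - 1) (p.2 - j - 1) else s.1),
             s.2 ++ [(j, min (j - p.1 - 1) (p.2 - j - 1), max (j - p.1 - 1) (p.2 - j - 1))])) s)
      = (fun (s : Int × List (Int × Int × Int)) (p : Int × Int) =>
          ((pvEnt p).foldl (fun a e => max a e.2.1) s.1, s.2 ++ pvEnt p)) := by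
    funext s p
    obtain ⟨s1, s2⟩ := s
    rw [PySem.List.foldl_prod_mk
          (f := fun a j => if a < min (j - p.1 - 1) (p.2 - j - 1) then min (j - p.1 - 1) (p.2 - j - 1) else a)
          (g := fun acc j => acc ++ [(j, min (j - p.1 - 1) (p.2 - j - 1), max (j - p.1 - 1) (p.2 - j - 1))])]
    rw [pv_inner_max, PySem.List.foldl_append_singleton_eq_map]
    rfl
  rw [hbody]
  rw [PySem.List.foldl_prod_mk (f := fun a p => (pvEnt p).foldl (fun a e => max a e.2.1) a)
        (g := fun acc p => acc ++ pvEnt p)]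
  rw [PySem.List.foldl_append_eq_flatMap, List.nil_append, ← List.foldl_flatMap]

/-- A's second loop: the running maximize_max and the filtered list -/
lemma pv_A_loop2 (E : List (Int × Int × Int)) (M : Int) :
    E.foldl (fun (s : Int × List (Int × Int × Int)) e =>
        if e.2.1 == M then ((if s.1 < e.2.2 then e.2.2 else s.1), s.2 ++ [e]) else s) (0, [])
    = ((E.filter (fun e => e.2.1 == M)).foldl (fun a e => max a e.2.2) 0,
       E.filter (fun e => e.2.1 == M)) := by
  rw [PySem.List.foldl_if_eq_foldl_filter (p := fun (e : Int × Int × Int) => e.2.1 == M)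
        (f := fun (s : Int × List (Int × Int × Int)) (e : Int × Int × Int) => ((if s.1 < e.2.2 then e.2.2 else s.1), s.2 ++ [e]))]
  rw [PySem.List.foldl_prod_mk (f := fun (a : Int) (e : Int × Int × Int) => if a < e.2.2 then e.2.2 else a)
        (g := fun (acc : List (Int × Int × Int)) (e : Int × Int × Int) => acc ++ [e])]
  rw [PySem.List.foldl_append_singleton_eq_self, List.nil_append]
  congr 1
  apply PySem.List.foldl_congr_mem
  intro acc x _
  dsimp only
  split <;> omega

/-- A's pipeline, rephrased over the list of adjacent pairs -/
lemma pv_A_eq (occ : List Int) :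
    get_next_stall occ =
      (let E := (occ.zip occ.tail).flatMap pvEnt
       let M := E.foldl (fun a e => max a e.2.1) 0
       let F := E.filter (fun e => e.2.1 == M)
       let X := F.foldl (fun a e => max a e.2.2) 0
       F.find? (fun e => e.2.2 == X)) := by
  simp only [get_next_stall]
  rw [pv_A_loop1]
  dsimp only
  rw [pv_A_loop2]

lemma pv_B_eq (occ : List Int) :
    get_next_stall_alt occ =
      match (occ.zip occ.tail).foldl pvBestF none with
      | none => none
      | some (g, l) => some (l + 1 + (g - 1) / 2, (g - 1) / 2, g - 1 - (g - 1) / 2) := by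
  unfold get_next_stall_alt
  rw [PySem.List.slice_from_one]
  have hf : (fun (b : Option (Int × Int)) (p : Int × Int) =>
      if decide (1 ≤ p.2 - p.1 - 1) && (match b with | none => true | some q => decide (q.1 < p.2 - p.1 - 1))
      then some (p.2 - p.1 - 1, p.1) else b) = pvBestF := rfl
  rw [hf]
  cases h : (occ.zip occ.tail).foldl pvBestF none with
  | none => simp
  | some gl =>
    obtain ⟨g, l⟩ := gl
    simp only []
    rw [PySem.Int.floordiv_eq_ediv_of_pos (b := 2) (by norm_num)]

-- ===== VERDICT (by name: the statement is the Claim_ definition above) =====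
theorem get_next_stall_spec : Claim_equal_get_next_stall := by
  intro occ _
  unfold Spec_get_next_stall
  rw [pv_A_eq, pv_B_eq]
  dsimp only
  cases hbest : (occ.zip occ.tail).foldl pvBestF none with
  | none =>
    obtain ⟨-, hall⟩ := pv_best_none _ none hbest
    have hE : (occ.zip occ.tail).flatMap pvEnt = [] := by
      apply List.flatMap_eq_nil_iff.mpr
      intro p hp
      unfold pvEnt
      rw [PySem.List.pyRange_one_eq_nil (by have := hall p hp; unfold pvGap at this; omega)]
      rfl
    simp [hE]
  | some gl =>
    obtain ⟨G, l0⟩ := gl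
    obtain h1 | h2 := pv_best_some _ none G l0 (by simp) hbest
    · exact absurd h1.1 (by simp)
    obtain ⟨hG1, hall, -, gs1, r0, gs2, hdec, hGr, hgs1⟩ := h2
    have hr0 : r0 = G + l0 + 1 := by omega
    set M : Int := (G - 1) / 2 with hM
    have hM0 : 0 ≤ M := by omega
    have hM2 : 2 * M ≤ G - 1 ∧ G - 1 ≤ 2 * M + 1 := by constructor <;> omega
    -- per-entry facts
    have hent : ∀ p ∈ occ.zip occ.tail, ∀ e ∈ pvEnt p,
        0 ≤ e.2.1 ∧ e.2.1 ≤ (pvGap p - 1) / 2 ∧ e.2.2 = pvGap p - 1 - e.2.1 := by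
      intro p hp e he
      obtain ⟨j, h1, h2, rfl⟩ := pv_mem_ent.mp he
      unfold pvGap
      refine ⟨by simp; omega, ?_, by simp; omega⟩
      simp only
      omega
    -- maximize_min = M
    have hminle : ∀ e ∈ (occ.zip occ.tail).flatMap pvEnt, e.2.1 ≤ M := by
      intro e he
      obtain ⟨p, hp, hep⟩ := List.mem_flatMap.mp he
      have h1 := (hent p hp e hep).2.1
      have h2 : (pvGap p - 1) / 2 ≤ (G - 1) / 2 := Int.ediv_le_ediv (by norm_num) (by have := hall p hp; omega)
      omega
    have hw : ((l0 + 1 + M, M, G - 1 - M) : Int × Int × Int) ∈ pvEnt (l0, r0) := by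
      apply pv_mem_ent.mpr
      refine ⟨l0 + 1 + M, by simp; omega, by simp; omega, ?_⟩
      have e1 : l0 + 1 + M - (l0, r0).1 - 1 = M := by simp; ring
      have e2 : (l0, r0).2 - (l0 + 1 + M) - 1 = G - 1 - M := by simp [hr0]; ring
      rw [e1, e2, min_eq_left (by omega), max_eq_right (by omega)]
    have hp0mem : ((l0, r0) : Int × Int) ∈ occ.zip occ.tail := by
      rw [hdec]; exact List.mem_append_right _ (List.mem_cons_self)
    have hwE : ((l0 + 1 + M, M, G - 1 - M) : Int × Int × Int) ∈ (occ.zip occ.tail).flatMap pvEnt :=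
      List.mem_flatMap.mpr ⟨(l0, r0), hp0mem, hw⟩
    rw [pv_foldl_max_eq (fun e => e.2.1) _ 0 M hM0 hminle (Or.inl ⟨_, hwE, rfl⟩)]
    -- maximize_max = G - 1 - M
    have hmaxle : ∀ e ∈ ((occ.zip occ.tail).flatMap pvEnt).filter (fun e => e.2.1 == M), e.2.2 ≤ G - 1 - M := by
      intro e he
      obtain ⟨heE, hem⟩ := List.mem_filter.mp he
      obtain ⟨p, hp, hep⟩ := List.mem_flatMap.mp heE
      have h1 := (hent p hp e hep).2.2
      have h2 := hall p hp
      have h3 : e.2.1 = M := by simpa using hem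
      omega
    have hwF : ((l0 + 1 + M, M, G - 1 - M) : Int × Int × Int)
        ∈ ((occ.zip occ.tail).flatMap pvEnt).filter (fun e => e.2.1 == M) :=
      List.mem_filter.mpr ⟨hwE, by simp⟩
    rw [pv_foldl_max_eq (fun e => e.2.2) _ 0 (G - 1 - M) (by omega) hmaxle (Or.inl ⟨_, hwF, rfl⟩)]
    -- the first qualifying entry
    rw [List.find?_filter]
    have hEdec : (occ.zip occ.tail).flatMap pvEnt
        = gs1.flatMap pvEnt ++ (pvEnt (l0, r0) ++ gs2.flatMap pvEnt) := by
      rw [hdec]; simp [List.flatMap_append]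
    rw [hEdec, List.find?_append]
    have hfirst : (gs1.flatMap pvEnt).find?
        (fun a => decide ((a.2.1 == M) = true ∧ (a.2.2 == G - 1 - M) = true)) = none := by
      apply List.find?_eq_none.mpr
      intro x hx
      obtain ⟨p, hp, hxp⟩ := List.mem_flatMap.mp hx
      have h1 := (hent p (by rw [hdec]; exact List.mem_append_left _ hp) x hxp).2.2
      have h2 : pvGap p ≤ G := hall p (by rw [hdec]; exact List.mem_append_left _ hp)
      have h3 : pvGap p < G := hgs1 p hp
      simp only [decide_eq_true_eq, beq_iff_eq, not_and]
      intro hxm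
      omega
    rw [hfirst, Option.none_or]
    -- inside the widest gap: entries left of the midpoint have min < M, the midpoint matches
    unfold pvEnt
    rw [PySem.List.pyRange_one_append (l0 + 1) (l0 + 1 + M) r0 (by omega) (by omega)]
    rw [List.map_append, List.find?_append, List.find?_append]
    have hleft : ((PySem.List.pyRange (l0 + 1) (l0 + 1 + M) 1).map
        (fun j => (j, min (j - (l0, r0).1 - 1) ((l0, r0).2 - j - 1), max (j - (l0, r0).1 - 1) ((l0, r0).2 - j - 1)))).find?
        (fun a => decide ((a.2.1 == M) = true ∧ (a.2.2 == G - 1 - M) = true)) = none := by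
      apply List.find?_eq_none.mpr
      intro x hx
      obtain ⟨j, hj, rfl⟩ := List.mem_map.mp hx
      rw [PySem.List.mem_pyRange_one] at hj
      simp only [decide_eq_true_eq, beq_iff_eq, not_and]
      intro hxm
      omega
    rw [hleft, Option.none_or]
    rw [PySem.List.pyRange_one_cons (by omega : l0 + 1 + M < r0), List.map_cons]
    dsimp only
    have e3 : (l0 + 1 + M, min (l0 + 1 + M - l0 - 1) (r0 - (l0 + 1 + M) - 1),
               max (l0 + 1 + M - l0 - 1) (r0 - (l0 + 1 + M) - 1)) = ((l0 + 1 + M, M, G - 1 - M) : Int × Int × Int) := by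
      have e1 : l0 + 1 + M - l0 - 1 = M := by ring
      have e2 : r0 - (l0 + 1 + M) - 1 = G - 1 - M := by omega
      rw [e1, e2, min_eq_left (by omega), max_eq_right (by omega)]
    rw [e3, List.find?_cons_of_pos (by simp), Option.some_or]
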